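-- pv_equiv track=rewrite | github.com/bebe-acme/monitorator | src/monitorator/tui/sprites.py | _jump_frame
-- ===== SOURCE A (Python) =====
-- _GRID_COLS = 12
--
-- def _jump_frame(grid: list[list[int]], offset: int) -> list[list[int]]:
--     """Shift entire grid UP by |offset| rows, fill bottom with transparent.
--
--     offset is negative (e.g. -2 = shift up 2 rows).
--     """
--     if offset >= 0:
--         return grid
--     shift = -offset
--     result: list[list[int]] = []
--     for r in range(len(grid)):
--         src = r + shift
--         if src < len(grid):
--             result.append(grid[src][:])
--         else:
--             result.append([0] * _GRID_COLS)
--     return result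
-- ===== SOURCE B (Python) =====
-- _GRID_COLS = 12
--
-- def _jump_frame(grid: list[list[int]], offset: int) -> list[list[int]]:
--     if offset >= 0:
--         return grid
--     # two-iterator pass: advance a source iterator over grid by |offset| rows
--     # (stopping early if it runs out), then walk grid once more for the length,
--     # drawing rows from the source iterator and emitting zero rows when it is dry.
--     src = iter(grid)
--     skipped = 0
--     while skipped < -offset and next(src, None) is not None:
--         skipped += 1
--     result = []
--     for _ in grid:
--         row = next(src, None)
--         result.append([0] * _GRID_COLS if row is None else list(row))
--     return result
-- ===== Notes on version B (the rewrite author's own statement) =====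
-- stated objective: alternative
-- what changed: Replaces A's index loop (r+shift with a bounds branch and grid[src] indexing) by a two-iterator pass: a source iterator advanced |offset| steps, then a single walk over grid pulling rows from that iterator and emitting zero rows once it is exhausted - no indices, no length comparison.
import Mathlib
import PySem

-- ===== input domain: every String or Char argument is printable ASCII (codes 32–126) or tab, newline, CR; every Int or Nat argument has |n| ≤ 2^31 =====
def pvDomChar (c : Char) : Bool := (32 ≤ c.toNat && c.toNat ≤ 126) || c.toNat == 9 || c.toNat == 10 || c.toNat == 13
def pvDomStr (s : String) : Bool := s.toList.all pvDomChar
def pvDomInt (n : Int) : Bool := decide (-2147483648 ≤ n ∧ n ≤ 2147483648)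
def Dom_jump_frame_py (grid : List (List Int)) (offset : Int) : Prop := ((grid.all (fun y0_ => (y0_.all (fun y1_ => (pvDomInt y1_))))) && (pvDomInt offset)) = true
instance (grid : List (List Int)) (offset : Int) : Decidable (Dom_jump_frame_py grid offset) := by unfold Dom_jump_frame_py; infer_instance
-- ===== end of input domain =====

-- B replaces A's index loop (src = r + shift with a bounds branch) by a two-iterator pass:
-- advance a source iterator |offset| steps, then walk the grid once pulling rows from it,
-- emitting zero rows once it is dry — same values, no index arithmetic.

-- ===== PORT A =====
-- literal transliteration of A: early exit, then a loop over range(len(grid)) appending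
-- either grid[src][:] (row copy = the row itself as a value) or a fresh zero row.
def jump_frame_py (grid : List (List Int)) (offset : Int) : List (List Int) :=
  if offset ≥ 0 then grid
  else
    let shift := -offset
    (PySem.List.pyRange 0 (grid.length : Int) 1).foldl
      (fun result r =>
        let src := r + shift
        if src < (grid.length : Int) then result ++ [PySem.List.pyGetD grid src []]
        else result ++ [List.replicate 12 0])
      []

-- ===== PORT B =====
-- the iterator is modelled as the list of its remaining elements.
-- the 'while skipped < -offset and next(src, None) is not None' skip loop:
def pvSkipIt : List (List Int) → Int → Int → List (List Int)
  | [], _, _ => []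
  | x :: rest, n, skipped =>
    if skipped < n then pvSkipIt rest n (skipped + 1) else x :: rest

-- the 'for _ in grid' driver loop: pull next(src, None), emit row copy or zero row.
def pvEmit (grid it : List (List Int)) : List (List Int) :=
  match grid with
  | [] => []
  | _ :: gs =>
    match it with
    | [] => List.replicate 12 0 :: pvEmit gs []
    | r :: rs => r :: pvEmit gs rs

-- transliteration of Source B: skip loop, then the driver pass.
def jump_frame_py_alt (grid : List (List Int)) (offset : Int) : List (List Int) :=
  if offset ≥ 0 then grid
  else pvEmit grid (pvSkipIt grid (-offset) 0)

-- ===== PRECONDITION & SPEC =====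
def Spec_jump_frame_py (grid : List (List Int)) (offset : Int) (out : List (List Int)) : Prop := out = jump_frame_py_alt grid offset
instance (grid : List (List Int)) (offset : Int) (out : List (List Int)) : Decidable (Spec_jump_frame_py grid offset out) := by unfold Spec_jump_frame_py; infer_instance

-- ===== CLAIM (what is proved, stated in full; the proofs are below) =====
def Claim_equal_jump_frame_py : Prop := ∀ (grid : List (List Int)) (offset : Int), Dom_jump_frame_py grid offset → Spec_jump_frame_py grid offset (jump_frame_py grid offset)

-- ===== LEMMAS AND PROOFS =====

-- the skip loop drops (n - skipped) elements (clamped)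
theorem pvSkipIt_eq_drop (it : List (List Int)) (n skipped : Int) :
    pvSkipIt it n skipped = it.drop (n - skipped).toNat := by
  induction it generalizing skipped with
  | nil => simp [pvSkipIt]
  | cons x rest ih =>
    rw [pvSkipIt]
    split
    · rw [ih]
      rw [show ((x :: rest).drop (n - skipped).toNat) = rest.drop ((n - skipped).toNat - 1) by
        rcases Nat.exists_eq_succ_of_ne_zero (n := (n - skipped).toNat) (by omega) with ⟨k, hk⟩
        simp [hk]]
      congr 1
      omega
    · rw [show (n - skipped).toNat = 0 by omega]
      simp

-- the driver pass is the source prefix followed by zero-row padding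
theorem pvEmit_eq (grid : List (List Int)) (it : List (List Int)) :
    pvEmit grid it = it.take grid.length ++
      List.replicate (grid.length - it.length) (List.replicate 12 0) := by
  induction grid generalizing it with
  | nil => simp [pvEmit]
  | cons g gs ih =>
    cases it with
    | nil => simp [pvEmit, ih, List.replicate_succ]
    | cons r rs => simp [pvEmit, ih]

-- core equality: A's loop value (as a map over the index range) is drop + padding
theorem shift_loop_eq (grid : List (List Int)) (s : Int) (hs : 0 < s) :
    (PySem.List.pyRange 0 (grid.length : Int) 1).map
      (fun r => if r + s < (grid.length : Int)
                then PySem.List.pyGetD grid (r + s) []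
                else List.replicate 12 0)
      = grid.drop s.toNat ++
        List.replicate (grid.length - (grid.drop s.toNat).length) (List.replicate 12 0) := by
  apply List.ext_getElem
  · simp [PySem.List.length_pyRange_one]
  · intro i h1 h2
    rw [List.getElem_map]
    have hi : i < grid.length := by
      simpa [PySem.List.length_pyRange_one] using h1
    rw [PySem.List.getElem_pyRange_one]
    by_cases hc : i + s.toNat < grid.length
    · rw [if_pos (by omega)]
      rw [show (0 : Int) + (i : Int) + s = ((i + s.toNat : Nat) : Int) by omega,
          PySem.List.pyGetD_natCast]
      rw [List.getElem_append_left (by simp; omega)]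
      simp only [List.getElem_drop]
      rw [List.getD_eq_getElem _ _ (by omega)]
      congr 1
      omega
    · rw [if_neg (by omega)]
      rw [List.getElem_append_right (by simp; omega)]
      simp

-- ===== VERDICT (by name: the statement is the Claim_ definition above) =====
theorem jump_frame_py_spec : Claim_equal_jump_frame_py := by
  intro grid offset _
  unfold Spec_jump_frame_py
  by_cases h : offset ≥ 0
  · simp [jump_frame_py, jump_frame_py_alt, h]
  · simp only [jump_frame_py, jump_frame_py_alt, if_neg h]
    have hfun : (fun (result : List (List Int)) (r : Int) =>
        if r + -offset < (grid.length : Int)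
        then result ++ [PySem.List.pyGetD grid (r + -offset) []]
        else result ++ [List.replicate 12 0]) =
      (fun result r => result ++ [if r + -offset < (grid.length : Int)
        then PySem.List.pyGetD grid (r + -offset) []
        else List.replicate 12 0]) := by
      funext result r; split_ifs <;> rfl
    rw [hfun, PySem.List.foldl_append_singleton_eq_map, List.nil_append]
    rw [pvSkipIt_eq_drop, pvEmit_eq]
    have htake : (grid.drop (-offset - 0).toNat).take grid.length
        = grid.drop (-offset - 0).toNat := by
      apply List.take_of_length_le; simp
    rw [htake]
    have hlen : grid.length - (grid.drop (-offset - 0).toNat).length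
        = grid.length - (grid.drop (-offset).toNat).length := by norm_num
    rw [hlen]
    rw [show (-offset - 0) = -offset by ring]
    exact shift_loop_eq grid (-offset) (by omega)
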